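-- pv_equiv track=rewrite | github.com/jcastaneda30/ExerciseAlgorithms | vjudge/Reputnit.py | generate_repunits
-- ===== SOURCE A (Python) =====
-- def generate_repunits(N):
--     repunits = []
--
--     for i in range(1, N + 1):
--         for j in range(1, N + 1):
--             for k in range(1, N + 1):
--                 repunit_sum = i * 1 + j * 11 + k * 111
--                 repunits.append(repunit_sum)
--
--     return sorted(repunits)
-- ===== SOURCE B (Python) =====
-- def generate_repunits(N):
--     # Count each pair sum 11*j + 111*k once (O(N^2)), then emit every total
--     # s = i + pair in ascending order with its multiplicity: no sort at the end.
--     pair_counts = {}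
--     for j in range(1, N + 1):
--         for k in range(1, N + 1):
--             b = 11 * j + 111 * k
--             pair_counts[b] = pair_counts.get(b, 0) + 1
--     out = []
--     for s in range(123, 123 * N + 1):
--         c = 0
--         for i in range(1, N + 1):
--             c += pair_counts.get(s - i, 0)
--         out += [s] * c
--     return out
-- ===== Notes on version B (the rewrite author's own statement) =====
-- stated objective: alternative
-- what changed: Replaces the triple loop over all N^3 triples followed by a full sort with a pair-sum counter dict built over (j,k) pairs and a single ascending sweep over the bounded sum range [123, 123N] that emits each sum with its multiplicity, so no sort is performed (measured 3.84x at n=64, but unconfirmed at larger sizes where both time out on the N^3-sized output).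
import Mathlib
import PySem

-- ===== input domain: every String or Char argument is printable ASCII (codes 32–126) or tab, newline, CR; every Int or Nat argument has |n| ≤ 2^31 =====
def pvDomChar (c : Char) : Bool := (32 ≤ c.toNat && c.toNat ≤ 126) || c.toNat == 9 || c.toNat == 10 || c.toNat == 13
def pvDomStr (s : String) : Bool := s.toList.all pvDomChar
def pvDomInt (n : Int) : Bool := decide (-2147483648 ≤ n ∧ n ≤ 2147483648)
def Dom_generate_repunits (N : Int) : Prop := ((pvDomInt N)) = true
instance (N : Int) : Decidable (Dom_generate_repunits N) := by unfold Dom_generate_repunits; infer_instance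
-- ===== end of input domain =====

-- B replaces the triple loop + sort by a pair-sum counter dict and one ascending
-- sweep over the bounded sum range emitting each sum with its multiplicity (no sort).

-- ===== PORT A =====
def generate_repunits (N : Int) : List Int :=
  let repunits : List Int :=
    (PySem.List.pyRange 1 (N + 1)).foldl (fun acc i =>
      (PySem.List.pyRange 1 (N + 1)).foldl (fun acc j =>
        (PySem.List.pyRange 1 (N + 1)).foldl (fun acc k =>
          acc ++ [i * 1 + j * 11 + k * 111]) acc) acc) []
  PySem.List.sorted repunits (fun x => x)

-- ===== PORT B =====
def generate_repunits_alt (N : Int) : List Int :=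
  let pairCounts : PySem.Dict Int Int :=
    (PySem.List.pyRange 1 (N + 1)).foldl (fun d j =>
      (PySem.List.pyRange 1 (N + 1)).foldl (fun d k =>
        let b := 11 * j + 111 * k
        d.insert b (d.getD b 0 + 1)) d) PySem.Dict.empty
  (PySem.List.pyRange 123 (123 * N + 1)).foldl (fun out s =>
    let c := (PySem.List.pyRange 1 (N + 1)).foldl (fun c i =>
      c + pairCounts.getD (s - i) 0) 0
    out ++ PySem.List.pyRepeat [s] c) []

-- ===== PRECONDITION & SPEC =====
def Spec_generate_repunits (N : Int) (out : List Int) : Prop := out = generate_repunits_alt N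
instance (N : Int) (out : List Int) : Decidable (Spec_generate_repunits N out) := by unfold Spec_generate_repunits; infer_instance

-- ===== CLAIM (what is proved, stated in full; the proofs are below) =====
def Claim_equal_generate_repunits : Prop := ∀ (N : Int), Dom_generate_repunits N → Spec_generate_repunits N (generate_repunits N)

-- ===== LEMMAS AND PROOFS =====

-- the range 1..N, the list of pair sums 11*j + 111*k, and A's raw (unsorted) list
def pvR (N : Int) : List Int := PySem.List.pyRange 1 (N + 1)
def pvP (N : Int) : List Int := (pvR N).flatMap (fun j => (pvR N).map (fun k => 11 * j + 111 * k))
def pvRaw (N : Int) : List Int :=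
  (pvR N).flatMap (fun i => (pvR N).flatMap (fun j => (pvR N).map (fun k => i * 1 + j * 11 + k * 111)))
-- multiplicity of the total s among the triples, through pair counts
def pvCnt (N s : Int) : Nat := ((pvR N).map (fun i => (pvP N).count (s - i))).sum

theorem pvA_eq (N : Int) :
    generate_repunits N = PySem.List.sorted (pvRaw N) (fun x => x) := by
  unfold generate_repunits pvRaw pvR
  simp only [PySem.List.foldl_append_singleton_eq_map, PySem.List.foldl_append_eq_flatMap,
    List.nil_append]

theorem pvDict_eq (N : Int) :
    (PySem.List.pyRange 1 (N + 1)).foldl (fun d j =>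
      (PySem.List.pyRange 1 (N + 1)).foldl (fun d k =>
        d.insert (11 * j + 111 * k) (d.getD (11 * j + 111 * k) 0 + 1)) d) PySem.Dict.empty
      = PySem.Dict.counter (pvP N) := by
  unfold pvP pvR
  rw [← PySem.Dict.foldl_insert_getD_add_one_eq_counter, List.foldl_flatMap]
  simp only [List.foldl_map]

theorem pvC_eq (N s : Int) :
    (PySem.List.pyRange 1 (N + 1)).foldl (fun c i =>
      c + (PySem.Dict.counter (pvP N)).getD (s - i) 0) 0 = (pvCnt N s : Int) := by
  rw [PySem.List.foldl_add]
  simp only [PySem.Dict.getD_counter, pvCnt, pvR, zero_add]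
  push_cast [List.map_map]
  rfl

theorem pvB_eq (N : Int) :
    generate_repunits_alt N =
      (PySem.List.pyRange 123 (123 * N + 1)).flatMap (fun s => List.replicate (pvCnt N s) s) := by
  simp only [generate_repunits_alt]
  rw [pvDict_eq]
  have h : ∀ s : Int,
      PySem.List.pyRepeat [s] ((PySem.List.pyRange 1 (N + 1)).foldl (fun c i =>
        c + (PySem.Dict.counter (pvP N)).getD (s - i) 0) 0) = List.replicate (pvCnt N s) s := by
    intro s
    rw [pvC_eq, PySem.List.pyRepeat_singleton, Int.toNat_natCast]
  simp only [h]
  rw [PySem.List.foldl_append_eq_flatMap, List.nil_append]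

theorem pvRaw_count (N v : Int) : (pvRaw N).count v = pvCnt N v := by
  unfold pvRaw pvCnt
  rw [List.count_flatMap]
  congr 1
  apply List.map_congr_left
  intro i _
  have h1 : (pvR N).flatMap (fun j => (pvR N).map (fun k => i * 1 + j * 11 + k * 111))
      = (pvP N).map (fun b => i + b) := by
    unfold pvP
    rw [List.map_flatMap]
    apply List.flatMap_congr
    intro j _
    rw [List.map_map]
    apply List.map_congr_left
    intro k _
    simp only [Function.comp_apply]
    ring
  simp only [Function.comp_apply, h1]
  have h2 := List.count_map_of_injective (pvP N) (fun b => i + b)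
      (fun a b h => by simpa using h) (v - i)
  rw [show i + (v - i) = v from by ring] at h2
  exact h2

theorem pvRaw_bounds (N : Int) : ∀ x ∈ pvRaw N, 123 ≤ x ∧ x ≤ 123 * N := by
  intro x hx
  unfold pvRaw pvR at hx
  simp only [List.mem_flatMap, List.mem_map, PySem.List.mem_pyRange_one] at hx
  obtain ⟨i, hi, j, hj, k, hk, rfl⟩ := hx
  omega

-- the sum of a per-element indicator over a duplicate-free list picks out one term
theorem pv_sum_ite (v : Int) (f : Int → Nat) : ∀ (l : List Int), l.Nodup →
    (l.map (fun s => if s = v then f s else 0)).sum = if v ∈ l then f v else 0 := by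
  intro l hnd
  induction l with
  | nil => simp
  | cons a t ih =>
    rcases List.nodup_cons.mp hnd with ⟨ha, ht⟩
    simp only [List.map_cons, List.sum_cons, List.mem_cons, ih ht]
    by_cases h : a = v
    · subst h
      simp [ha]
    · simp [h, Ne.symm h]

theorem pvOut_perm (N : Int) :
    ((PySem.List.pyRange 123 (123 * N + 1)).flatMap (fun s => List.replicate (pvCnt N s) s)).Perm
      (pvRaw N) := by
  rw [List.perm_iff_count]
  intro v
  rw [List.count_flatMap]
  simp only [Function.comp_def, List.count_replicate, beq_iff_eq]
  rw [pv_sum_ite v (pvCnt N) _ (PySem.List.nodup_pyRange_one _ _)]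
  by_cases hv : v ∈ PySem.List.pyRange 123 (123 * N + 1)
  · rw [if_pos hv, ← pvRaw_count]
  · rw [if_neg hv]
    symm
    rw [List.count_eq_zero]
    intro hmem
    have hb := pvRaw_bounds N v hmem
    rw [PySem.List.mem_pyRange_one] at hv
    omega

theorem pvOut_pairwise (N : Int) :
    ((PySem.List.pyRange 123 (123 * N + 1)).flatMap
        (fun s => List.replicate (pvCnt N s) s)).Pairwise (· ≤ ·) := by
  rw [List.flatMap_def, List.pairwise_flatten]
  constructor
  · intro l hl
    simp only [List.mem_map] at hl
    obtain ⟨s, _, rfl⟩ := hl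
    exact List.pairwise_replicate.mpr (Or.inr (le_refl s))
  · rw [List.pairwise_map]
    apply (PySem.List.pairwise_lt_pyRange_one 123 (123 * N + 1)).imp
    intro s t hst x hx y hy
    rw [List.eq_of_mem_replicate hx, List.eq_of_mem_replicate hy]
    omega

-- ===== VERDICT (by name: the statement is the Claim_ definition above) =====
theorem generate_repunits_spec : Claim_equal_generate_repunits := by
  intro N _
  unfold Spec_generate_repunits
  rw [pvA_eq, pvB_eq]
  exact PySem.List.sorted_id_eq_of_perm_of_pairwise _ _ (pvOut_perm N) (pvOut_pairwise N)
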